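-- pv_equiv track=rewrite | github.com/fanmingyu212/qfabric | src/qfabric/planner/segmenter/m4i6622.py | _get_consecutive_regions
-- ===== SOURCE A (Python) =====
-- def _get_consecutive_regions(indices: list[int]) -> list[tuple[int, int]]:
--     """
--     Groups consecutive values in a list.
--
--     Examples:
--         >>> self._get_consecutive_regions([1, 2, 4, 5, 6, 8])
--         [(1, 2), (4, 6), (8, 8)]
--     """
--     if len(indices) == 0:
--         return []
--     regions = []
--     start = prev = indices[0]
--     for x in indices[1:]:
--         if x == prev + 1:
--             prev = x
--         else:
--             regions.append((start, prev))
--             start = prev = x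
--     regions.append((start, prev))
--     return regions
-- ===== SOURCE B (Python) =====
-- def _get_consecutive_regions(indices: list[int]) -> list[tuple[int, int]]:
--     """Group consecutive values: run scanning by offset (indices[i+k] == start+k), end in closed form."""
--     regions = []
--     n = len(indices)
--     i = 0
--     while i < n:
--         s = indices[i]
--         k = 1
--         while i + k < n and indices[i + k] == s + k:
--             k += 1
--         regions.append((s, s + k - 1))
--         i += k
--     return regions
-- ===== Notes on version B (the rewrite author's own statement) =====
-- stated objective: alternative
-- what changed: Replaces A's start/prev state machine over elements with an index-based run scan: an outer loop over run starts and an inner scan comparing indices[i+k] against start+k (the offset trick), emitting (start, start+k-1) in closed form.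
import Mathlib
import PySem

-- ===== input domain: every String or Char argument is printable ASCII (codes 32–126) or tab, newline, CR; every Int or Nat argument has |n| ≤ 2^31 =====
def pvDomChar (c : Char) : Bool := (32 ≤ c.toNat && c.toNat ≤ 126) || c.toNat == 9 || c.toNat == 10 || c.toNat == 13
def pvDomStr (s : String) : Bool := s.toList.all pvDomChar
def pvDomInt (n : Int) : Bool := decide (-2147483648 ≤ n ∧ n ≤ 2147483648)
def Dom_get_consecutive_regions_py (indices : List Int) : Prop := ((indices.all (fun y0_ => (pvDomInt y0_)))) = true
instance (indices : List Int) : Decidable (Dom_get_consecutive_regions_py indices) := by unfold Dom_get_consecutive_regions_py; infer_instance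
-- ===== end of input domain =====

-- B replaces A's start/prev state machine with an index-based run scan (inner scan compares
-- indices[i+k] with start+k, the run end is start+k-1 in closed form); objective: alternative.

-- ===== PORT A =====
-- A's loop keeps state (regions, start, prev); literal foldl over indices[1:].
def get_consecutive_regions_py (indices : List Int) : List (Int × Int) :=
  match indices with
  | [] => []
  | h :: t =>
    let st := t.foldl (fun (s : List (Int × Int) × Int × Int) x =>
        if x = s.2.2 + 1 then (s.1, s.2.1, x)
        else (s.1 ++ [(s.2.1, s.2.2)], x, x)) ([], h, h)
    st.1 ++ [(st.2.1, st.2.2)]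

-- ===== PORT B =====
-- inner while of Source B: while i+k < n and indices[i+k] == s + k: k += 1
-- (indices.getD is exact here: access is guarded by i+k < indices.length, as in Python)
def pvRunLen (indices : List Int) (s : Int) (i : Nat) (k : Nat) : Nat :=
  if h : i + k < indices.length ∧ indices.getD (i + k) 0 = s + (k : Int) then
    pvRunLen indices s i (k + 1)
  else k
termination_by indices.length - (i + k)
decreasing_by omega

-- needed by pvGoIdx's termination (the outer while advances i by k ≥ 1)
theorem pvRunLen_ge (indices : List Int) (s : Int) (i k : Nat) : k ≤ pvRunLen indices s i k := by
  unfold pvRunLen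
  split
  · exact Nat.le_trans (Nat.le_succ k) (pvRunLen_ge indices s i (k + 1))
  · exact Nat.le_refl k
termination_by indices.length - (i + k)
decreasing_by omega

-- outer while of Source B (i is the start index of the current run)
def pvGoIdx (indices : List Int) (i : Nat) : List (Int × Int) :=
  if _h : i < indices.length then
    let s := indices.getD i 0
    let k := pvRunLen indices s i 1
    (s, s + (k : Int) - 1) :: pvGoIdx indices (i + k)
  else []
termination_by indices.length - i
decreasing_by
  have := pvRunLen_ge indices (indices.getD i 0) i 1
  omega

def get_consecutive_regions_py_alt (indices : List Int) : List (Int × Int) :=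
  pvGoIdx indices 0

-- ===== PRECONDITION & SPEC =====
def Spec_get_consecutive_regions_py (indices : List Int) (out : List (Int × Int)) : Prop := out = get_consecutive_regions_py_alt indices
instance (indices : List Int) (out : List (Int × Int)) : Decidable (Spec_get_consecutive_regions_py indices out) := by unfold Spec_get_consecutive_regions_py; infer_instance

-- ===== CLAIM (what is proved, stated in full; the proofs are below) =====
def Claim_equal_get_consecutive_regions_py : Prop := ∀ (indices : List Int), Dom_get_consecutive_regions_py indices → Spec_get_consecutive_regions_py indices (get_consecutive_regions_py indices)

-- ===== LEMMAS AND PROOFS =====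

-- reference recursion: A's state machine written structurally (proof-only)
def pvSpec (s p : Int) : List Int → List (Int × Int)
  | [] => [(s, p)]
  | x :: t => if x = p + 1 then pvSpec s x t else (s, p) :: pvSpec x x t

theorem pvFoldA (t : List Int) : ∀ (acc : List (Int × Int)) (s p : Int),
    (let st := t.foldl (fun (st : List (Int × Int) × Int × Int) x =>
        if x = st.2.2 + 1 then (st.1, st.2.1, x)
        else (st.1 ++ [(st.2.1, st.2.2)], x, x)) (acc, s, p)
     st.1 ++ [(st.2.1, st.2.2)]) = acc ++ pvSpec s p t := by
  induction t with
  | nil => intro acc s p; simp [pvSpec]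
  | cons x t ih =>
    intro acc s p
    simp only [List.foldl_cons, pvSpec]
    by_cases hx : x = p + 1
    · simp [hx, ih]
    · simp [hx, ih, List.append_assoc]

theorem portA_eq_spec (h : Int) (t : List Int) :
    get_consecutive_regions_py (h :: t) = pvSpec h h t := by
  have := pvFoldA t [] h h
  simpa [get_consecutive_regions_py] using this

theorem pvDropConsGeOne (x : Int) (t : List Int) (k : Nat) (hk : 1 ≤ k) :
    (x :: t).drop k = t.drop (k - 1) := by
  rcases Nat.exists_eq_add_of_le hk with ⟨c, hc⟩
  subst hc
  simp [Nat.add_comm 1 c]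

-- list-level version of B's run length
def pvRl (s : Int) (k : Nat) : List Int → Nat
  | [] => k
  | x :: t => if x = s + (k : Int) then pvRl s (k + 1) t else k

theorem pvRl_ge (s : Int) (t : List Int) : ∀ k, k ≤ pvRl s k t := by
  induction t with
  | nil => intro k; simp [pvRl]
  | cons x t ih =>
    intro k
    simp only [pvRl]
    split
    · exact Nat.le_trans (Nat.le_succ k) (ih (k + 1))
    · exact Nat.le_refl k

-- list-level version of B's outer loop
def pvGoL : List Int → List (Int × Int)
  | [] => []
  | s :: t =>
    let k := pvRl s 1 t
    (s, s + (k : Int) - 1) :: pvGoL ((s :: t).drop k)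
termination_by l => l.length
decreasing_by
  have := pvRl_ge s t 1
  simp [List.length_drop]
  omega

theorem pvRunLen_bridge (indices : List Int) (s : Int) :
    ∀ m i k, indices.length - (i + k) = m → i + k ≤ indices.length →
      pvRunLen indices s i k = pvRl s k (indices.drop (i + k)) := by
  intro m
  induction m with
  | zero =>
    intro i k hm hle
    have hlen : i + k = indices.length := by omega
    rw [pvRunLen, pvRl.eq_def]
    have : indices.drop (i + k) = [] := by simp [hlen]
    rw [this]
    simp [hlen]
  | succ m ih =>
    intro i k hm hle
    have hlt : i + k < indices.length := by omega
    have hd : indices.drop (i + k) = indices[i + k] :: indices.drop (i + k + 1) :=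
      List.drop_eq_getElem_cons hlt
    have hgd : indices.getD (i + k) 0 = indices[i + k] := List.getD_eq_getElem indices 0 hlt
    rw [pvRunLen, hd]
    simp only [pvRl]
    by_cases hx : indices[i + k] = s + (k : Int)
    · rw [if_pos hx, dif_pos ⟨hlt, by rw [hgd]; exact hx⟩]
      rw [ih i (k + 1) (by omega) (by omega)]
      rw [show i + (k + 1) = i + k + 1 from by omega]
    · rw [if_neg hx, dif_neg (by rw [hgd]; exact fun hc => hx hc.2)]

theorem pvRunLen_le (indices : List Int) (s : Int) :
    ∀ m i k, indices.length - (i + k) = m → i + k ≤ indices.length →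
      i + pvRunLen indices s i k ≤ indices.length := by
  intro m
  induction m with
  | zero =>
    intro i k hm hle
    rw [pvRunLen, dif_neg (by omega)]
    exact hle
  | succ m ih =>
    intro i k hm hle
    rw [pvRunLen]
    split
    · exact ih i (k + 1) (by omega) (by omega)
    · exact hle

theorem pvGoIdx_bridge (indices : List Int) :
    ∀ m i, indices.length - i ≤ m → i ≤ indices.length →
      pvGoIdx indices i = pvGoL (indices.drop i) := by
  intro m
  induction m with
  | zero =>
    intro i hm hle
    have : i = indices.length := by omega
    rw [pvGoIdx]
    simp [this, pvGoL]
  | succ m ih =>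
    intro i hm hle
    rcases Nat.lt_or_ge indices.length (i + 1) with hge | hlt'
    · have hi : i = indices.length := by omega
      rw [pvGoIdx]
      simp [hi, pvGoL]
    have hlt : i < indices.length := by omega
    have hd : indices.drop i = indices[i] :: indices.drop (i + 1) :=
      List.drop_eq_getElem_cons hlt
    have hgd : indices.getD i 0 = indices[i] := List.getD_eq_getElem indices 0 hlt
    rw [pvGoIdx, dif_pos hlt, hd]
    simp only [pvGoL, hgd]
    have hrun : pvRunLen indices indices[i] i 1 = pvRl indices[i] 1 (indices.drop (i + 1)) :=
      pvRunLen_bridge indices indices[i] (indices.length - (i + 1)) i 1 rfl (by omega)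
    have hle2 : i + pvRunLen indices indices[i] i 1 ≤ indices.length :=
      pvRunLen_le indices indices[i] (indices.length - (i + 1)) i 1 rfl (by omega)
    rw [hrun] at hle2
    rw [hrun]
    have hk1 : 1 ≤ pvRl indices[i] 1 (indices.drop (i + 1)) :=
      pvRl_ge indices[i] (indices.drop (i + 1)) 1
    have hdrop : (indices[i] :: indices.drop (i + 1)).drop (pvRl indices[i] 1 (indices.drop (i + 1)))
        = indices.drop (i + pvRl indices[i] 1 (indices.drop (i + 1))) := by
      rw [← hd, List.drop_drop]
    rw [hdrop]
    congr 1
    exact ih (i + pvRl indices[i] 1 (indices.drop (i + 1))) (by omega) hle2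


theorem pvSpec_goL (t : List Int) : ∀ (s : Int) (k : Nat), 1 ≤ k →
    (s, s + (pvRl s k t : Int) - 1) :: pvGoL (t.drop (pvRl s k t - k)) =
      pvSpec s (s + (k : Int) - 1) t := by
  induction t with
  | nil => intro s k hk; simp [pvRl, pvSpec, pvGoL]
  | cons x t ih =>
    intro s k hk
    simp only [pvRl, pvSpec]
    by_cases hx : x = s + (k : Int)
    · have hp : x = s + (k : Int) - 1 + 1 := by omega
      rw [if_pos hx, if_pos hp]
      have hR := pvRl_ge s t (k + 1)
      have hdrop : (x :: t).drop (pvRl s (k + 1) t - k) = t.drop (pvRl s (k + 1) t - (k + 1)) := by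
        rw [pvDropConsGeOne x t _ (by omega)]
        rw [show pvRl s (k + 1) t - k - 1 = pvRl s (k + 1) t - (k + 1) from by omega]
      rw [hdrop]
      have := ih s (k + 1) (by omega)
      rw [hx, show s + (k : Int) = s + ((k : Nat) + 1 : Nat) - 1 by push_cast; ring]
      exact this
    · have hp : ¬ x = s + (k : Int) - 1 + 1 := by omega
      rw [if_neg hx, if_neg hp]
      simp only [Nat.sub_self, List.drop_zero]
      congr 1
      rw [pvGoL]
      have := ih x 1 (by omega)
      simp only [Nat.cast_one] at this ⊢
      rw [show x + 1 - 1 = x by ring] at this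
      have hd1 : (x :: t).drop (pvRl x 1 t) = t.drop (pvRl x 1 t - 1) :=
        pvDropConsGeOne x t _ (pvRl_ge x t 1)
      rw [hd1]
      exact this

theorem pvGoL_eq_spec (h : Int) (t : List Int) : pvGoL (h :: t) = pvSpec h h t := by
  rw [pvGoL]
  have hone := pvSpec_goL t h 1 (le_refl 1)
  simp only [Nat.cast_one] at hone
  rw [show h + 1 - 1 = h by ring] at hone
  have hd1 : (h :: t).drop (pvRl h 1 t) = t.drop (pvRl h 1 t - 1) :=
    pvDropConsGeOne h t _ (pvRl_ge h t 1)
  rw [hd1]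
  exact hone

-- ===== VERDICT (by name: the statement is the Claim_ definition above) =====
theorem get_consecutive_regions_py_spec : Claim_equal_get_consecutive_regions_py := by
  intro indices _
  unfold Spec_get_consecutive_regions_py get_consecutive_regions_py_alt
  have hb := pvGoIdx_bridge indices indices.length 0 (by omega) (by omega)
  rw [hb, List.drop_zero]
  cases indices with
  | nil => simp [get_consecutive_regions_py, pvGoL]
  | cons h t => rw [portA_eq_spec, pvGoL_eq_spec]
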